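-- pv_equiv track=rewrite | github.com/FAdy-200/problem_solving | misc/ATL/exam/Q1.py | subcheck
-- ===== SOURCE A (Python) =====
-- def subcheck(s, ind):
--     n = len(s)
--
--     if n % ind:
--         return False
--     chunks = n // ind
--     for i in range(chunks):
--         m1 = s[i * ind:(ind * (i + 1))]
--         m2 = s[n - (i + 1) * ind:n - i * ind]
--         if m1 != m2:
--             return False
--     return True
-- ===== SOURCE B (Python) =====
-- def subcheck(s, ind):
--     n = len(s)
--     if n % ind:
--         return False
--     chunks = n // ind
--     return all(s[i * ind + r] == s[(chunks - 1 - i) * ind + r]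
--                for i in range(chunks // 2) for r in range(ind))
-- ===== Notes on version B (the rewrite author's own statement) =====
-- stated objective: alternative
-- what changed: B drops A's slice machinery entirely: instead of building substring chunks and comparing each with its mirror slice over all chunk indices, B compares individual characters by index arithmetic (s[i*ind+r] vs s[(chunks-1-i)*ind+r]) and only walks the first half of the chunk indices, relying on symmetry of the comparison.
import Mathlib
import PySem

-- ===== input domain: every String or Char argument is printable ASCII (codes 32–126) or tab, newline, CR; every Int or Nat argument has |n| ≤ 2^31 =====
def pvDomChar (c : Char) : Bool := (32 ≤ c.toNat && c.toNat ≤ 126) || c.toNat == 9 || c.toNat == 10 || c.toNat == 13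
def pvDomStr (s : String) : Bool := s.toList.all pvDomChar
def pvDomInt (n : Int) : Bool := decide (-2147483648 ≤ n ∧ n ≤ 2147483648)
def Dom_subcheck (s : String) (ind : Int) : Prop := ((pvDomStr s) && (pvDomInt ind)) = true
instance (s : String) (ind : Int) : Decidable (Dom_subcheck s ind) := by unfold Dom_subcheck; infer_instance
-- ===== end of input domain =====

-- B replaces A's slice-based mirror-chunk loop by character-level index arithmetic over
-- only the first half of the chunk indices (no substrings are built); objective: alternative.

-- ===== PORT A =====
def subcheckLoop (cs : List Char) (n ind : Int) : List Int → Bool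
  | [] => true
  | i :: rest =>
    let m1 := PySem.List.slice cs (some (i * ind)) (some (ind * (i + 1)))
    let m2 := PySem.List.slice cs (some (n - (i + 1) * ind)) (some (n - i * ind))
    if m1 ≠ m2 then false else subcheckLoop cs n ind rest

def subcheck (s : String) (ind : Int) : Bool :=
  let cs := s.toList
  let n : Int := cs.length
  if PySem.Int.mod n ind ≠ 0 then false
  else subcheckLoop cs n ind (PySem.List.pyRange 0 (PySem.Int.floordiv n ind) 1)

-- ===== PORT B =====
def subcheck_alt (s : String) (ind : Int) : Bool :=
  let cs := s.toList
  let n : Int := cs.length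
  if PySem.Int.mod n ind ≠ 0 then false
  else
    let chunks := PySem.Int.floordiv n ind
    (PySem.List.pyRange 0 (PySem.Int.floordiv chunks 2) 1).all fun i =>
      (PySem.List.pyRange 0 ind 1).all fun r =>
        PySem.List.pyGet? cs (i * ind + r) == PySem.List.pyGet? cs ((chunks - 1 - i) * ind + r)

-- ===== PRECONDITION & SPEC =====
-- Pre_ excludes ind = 0, on which both A and B raise ZeroDivisionError at 'n % ind'.
def Pre_subcheck (s : String) (ind : Int) : Prop := ind ≠ 0
instance (s : String) (ind : Int) : Decidable (Pre_subcheck s ind) := by unfold Pre_subcheck; infer_instance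
def pvWitness_subcheck : String × Int := ("abba", 2)

def Spec_subcheck (s : String) (ind : Int) (out : Bool) : Prop := out = subcheck_alt s ind
instance (s : String) (ind : Int) (out : Bool) : Decidable (Spec_subcheck s ind out) := by unfold Spec_subcheck; infer_instance

-- ===== CLAIM (what is proved, stated in full; the proofs are below) =====
def Claim_equal_subcheck : Prop := ∀ (s : String) (ind : Int), Dom_subcheck s ind → Pre_subcheck s ind → Spec_subcheck s ind (subcheck s ind)

-- ===== LEMMAS AND PROOFS =====

-- A's loop is the 'all' of the mirror-pair slice test over the index list.
theorem subcheckLoop_eq_all (cs : List Char) (n ind : Int) (L : List Int) :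
    subcheckLoop cs n ind L =
      L.all (fun i =>
        PySem.List.slice cs (some (i * ind)) (some (ind * (i + 1))) ==
        PySem.List.slice cs (some (n - (i + 1) * ind)) (some (n - i * ind))) := by
  induction L with
  | nil => rfl
  | cons i rest ih =>
    simp only [subcheckLoop, List.all_cons, ih]
    by_cases h : PySem.List.slice cs (some (i * ind)) (some (ind * (i + 1))) =
        PySem.List.slice cs (some (n - (i + 1) * ind)) (some (n - i * ind)) <;>
      simp [h]

-- equality of two in-range length-k windows of cs is pointwise character equality
theorem window_eq_iff (cs : List Char) (a b k : Nat)
    (ha : a + k ≤ cs.length) (hb : b + k ≤ cs.length) :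
    ((cs.drop a).take k = (cs.drop b).take k) ↔ ∀ r < k, cs[a + r]? = cs[b + r]? := by
  constructor
  · intro he r hr
    have h1 : a + r < cs.length := by omega
    have h2 : b + r < cs.length := by omega
    have hr1 : r < ((cs.drop a).take k).length := by simp; omega
    have hr2 : r < ((cs.drop b).take k).length := by simp; omega
    have := List.getElem_of_eq he hr1
    simp only [List.getElem_take, List.getElem_drop] at this
    rw [List.getElem?_eq_getElem h1, List.getElem?_eq_getElem h2]
    exact congrArg some this
  · intro h
    apply List.ext_getElem (by simp; omega)
    intro r hr1 hr2
    simp only [List.getElem_take, List.getElem_drop]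
    have hrk : r < k := by simp at hr1; omega
    have h1 : a + r < cs.length := by omega
    have h2 : b + r < cs.length := by omega
    have := h r hrk
    rw [List.getElem?_eq_getElem h1, List.getElem?_eq_getElem h2] at this
    exact Option.some.inj this

-- the full mirror check is equivalent to checking only the first half of the chunk indices
theorem half_check_iff (cs : List Char) (k K : Nat) :
    (∀ i < K, ∀ r < k, cs[i * k + r]? = cs[(K - 1 - i) * k + r]?) ↔
    (∀ i < K / 2, ∀ r < k, cs[i * k + r]? = cs[(K - 1 - i) * k + r]?) := by
  constructor
  · intro h i hi; exact h i (by omega)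
  · intro h i hi r hr
    by_cases hhalf : i < K / 2
    · exact h i hhalf r hr
    · by_cases hmid : K - 1 - i = i
      · rw [hmid]
      · have hi' : K - 1 - i < K / 2 := by omega
        have := h (K - 1 - i) hi' r hr
        have hback : K - 1 - (K - 1 - i) = i := by omega
        rw [hback] at this
        exact this.symm

theorem subcheck_equal (s : String) (ind : Int) (hpre : ind ≠ 0) :
    subcheck s ind = subcheck_alt s ind := by
  unfold subcheck subcheck_alt
  by_cases hm : PySem.Int.mod ((s.toList.length : Int)) ind = 0
  · simp only [hm, ne_eq, not_true_eq_false, if_false]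
    set cs := s.toList with hcs
    set n : Int := (cs.length : Int) with hn
    set c : Int := PySem.Int.floordiv n ind with hc
    have hnc : c * ind = n := by
      have h1 := PySem.Int.floordiv_mul_add_mod n ind
      rw [← hc] at h1
      omega
    have hnn : (0:Int) ≤ n := by positivity
    by_cases hpos : 0 < ind
    · -- positive chunk size: c ≥ 0, n = c * ind
      have hcnn : (0:Int) ≤ c := by nlinarith
      obtain ⟨K, hK⟩ : ∃ K : Nat, c = (K : Int) := ⟨c.toNat, by omega⟩
      obtain ⟨k, hk⟩ : ∃ k : Nat, ind = (k : Int) := ⟨ind.toNat, by omega⟩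
      have hkpos : 0 < k := by omega
      have hnK : cs.length = K * k := by
        have : ((K * k : Nat) : Int) = n := by push_cast; rw [← hK, ← hk]; exact hnc
        omega
      have hhalf : PySem.Int.floordiv c 2 = ((K / 2 : Nat) : Int) := by
        rw [hK]; exact_mod_cast PySem.Int.floordiv_natCast K 2
      rw [subcheckLoop_eq_all, hhalf, hK, hk]
      rw [PySem.List.pyRange_one 0 (K:Int), PySem.List.pyRange_one 0 ((K/2 : Nat):Int),
          PySem.List.pyRange_one 0 (k:Int)]
      rw [Bool.eq_iff_iff]
      simp only [sub_zero, Int.toNat_natCast, zero_add, List.all_map, List.all_eq_true,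
        List.mem_range, Function.comp, beq_iff_eq]
      -- characterize each side
      have sliceL : ∀ i : Nat, i < K →
          PySem.List.slice cs (some ((i:Int) * (k:Int))) (some ((k:Int) * ((i:Int) + 1)))
            = (cs.drop (i * k)).take k := by
        intro i hi
        have e1 : (i:Int) * (k:Int) = ((i * k : Nat) : Int) := by push_cast; ring
        have e2 : (k:Int) * ((i:Int) + 1) = ((i * k + k : Nat) : Int) := by push_cast; ring
        rw [e1, e2, PySem.List.slice_natCast]
        congr 1
        omega
      have sliceR : ∀ i : Nat, i < K →
          PySem.List.slice cs (some (n - ((i:Int) + 1) * (k:Int))) (some (n - (i:Int) * (k:Int)))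
            = (cs.drop ((K - 1 - i) * k)).take k := by
        intro i hi
        have e1 : n - ((i:Int) + 1) * (k:Int) = (((K - 1 - i) * k : Nat) : Int) := by
          rw [← hnc, hK, hk, Nat.cast_mul, Nat.cast_sub (by omega), Nat.cast_sub (by omega)]
          push_cast; ring
        have e2 : n - (i:Int) * (k:Int) = (((K - 1 - i) * k + k : Nat) : Int) := by
          rw [← hnc, hK, hk, Nat.cast_add, Nat.cast_mul, Nat.cast_sub (by omega), Nat.cast_sub (by omega)]
          push_cast; ring
        rw [e1, e2, PySem.List.slice_natCast]
        congr 1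
        omega
      have getL : ∀ (i r : Nat),
          PySem.List.pyGet? cs ((i:Int) * (k:Int) + (r:Int)) = cs[i * k + r]? := by
        intro i r
        have e : (i:Int) * (k:Int) + (r:Int) = ((i * k + r : Nat) : Int) := by push_cast; ring
        rw [e, PySem.List.pyGet?_natCast]
      have getR : ∀ (i r : Nat), i < K / 2 →
          PySem.List.pyGet? cs (((K:Int) - 1 - (i:Int)) * (k:Int) + (r:Int))
            = cs[(K - 1 - i) * k + r]? := by
        intro i r hi
        have e : ((K:Int) - 1 - (i:Int)) * (k:Int) + (r:Int) = (((K - 1 - i) * k + r : Nat) : Int) := by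
          rw [Nat.cast_add, Nat.cast_mul, Nat.cast_sub (by omega), Nat.cast_sub (by omega)]
          push_cast; ring
        rw [e, PySem.List.pyGet?_natCast]
      have hwinL : ∀ i : Nat, i < K → i * k + k ≤ K * k := by
        intro i hi
        have h1 : i + 1 ≤ K := by omega
        calc i * k + k = (i + 1) * k := by ring
          _ ≤ K * k := Nat.mul_le_mul_right k h1
      have hwinR : ∀ i : Nat, i < K → (K - 1 - i) * k + k ≤ K * k := by
        intro i hi
        have h1 : (K - 1 - i) + 1 ≤ K := by omega
        calc (K - 1 - i) * k + k = ((K - 1 - i) + 1) * k := by ring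
          _ ≤ K * k := Nat.mul_le_mul_right k h1
      constructor
      · intro h i hi
        have hiK : i < K := by omega
        have hfull : ∀ j < K, ∀ r < k, cs[j * k + r]? = cs[(K - 1 - j) * k + r]? := by
          intro j hj r hr
          have hthis := h j hj
          rw [sliceL j hj, sliceR j hj] at hthis
          exact (window_eq_iff cs (j * k) ((K - 1 - j) * k) k
            (by rw [hnK]; exact hwinL j hj) (by rw [hnK]; exact hwinR j hj)).mp hthis r hr
        intro r hr
        rw [getL i r, getR i r hi]
        exact hfull i hiK r hr
      · intro h i hi
        rw [sliceL i hi, sliceR i hi]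
        apply (window_eq_iff cs (i * k) ((K - 1 - i) * k) k
          (by rw [hnK]; exact hwinL i hi) (by rw [hnK]; exact hwinR i hi)).mpr
        refine (half_check_iff cs k K).mpr ?_ i hi
        intro j hj r hr
        have hthis := h j hj r hr
        rw [getL j r, getR j r hj] at hthis
        exact hthis
    · -- negative chunk size: both ranges are empty, both sides true
      have hneg : ind < 0 := by omega
      have hcle : c ≤ 0 := by nlinarith
      have hc2 : PySem.Int.floordiv c 2 ≤ 0 := by
        rw [PySem.Int.floordiv_eq_ediv_of_pos (by omega : (0:Int) < 2)]
        omega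
      rw [PySem.List.pyRange_one_eq_nil (by omega), PySem.List.pyRange_one_eq_nil (by omega)]
      rfl
  · simp only [hm, ne_eq, not_false_eq_true, if_true]

-- ===== VERDICT (by name: the statement is the Claim_ definition above) =====
theorem subcheck_spec : Claim_equal_subcheck := by
  intro s ind _ hpre
  unfold Spec_subcheck
  exact subcheck_equal s ind hpre
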